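-- pv_equiv track=rewrite | github.com/miniky04/do-algorithm | programmers/Kakao/p17681.py | solution
-- ===== SOURCE A (Python) =====
-- def solution(n, arr1, arr2):
--     binary_list = []
--     for i in range(n):
--         binary = arr1[i] | arr2[i]
--         binary2 = str(bin(binary)[2:])
--         binary2 = binary2.zfill(n)
--         binary_list.append(binary2.replace('1', '#').replace('0', ' '))
--     return binary_list
-- ===== SOURCE B (Python) =====
-- def solution(n, arr1, arr2):
--     rows = []
--     for i in range(n):
--         v = arr1[i] | arr2[i]
--         chars = []
--         while v:
--             chars.append('#' if v & 1 else ' ')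
--             v >>= 1
--         chars += [' '] * (n - len(chars))
--         rows.append(''.join(reversed(chars)))
--     return rows
-- ===== Notes on version B (the rewrite author's own statement) =====
-- stated objective: alternative
-- what changed: Replaces A's bin()/[2:]/zfill/replace string pipeline with arithmetic digit extraction: each row's characters are produced low-to-high by testing v & 1 and shifting, padded with spaces to width n, and reversed; Pre_ excludes n exceeding a list length (A raises IndexError) and negative entries among the first n, where A's bin()[2:] leaves a stray 'b' in the row (an artefact of its string slicing) and B's while-loop does not terminate.
-- outside the precondition, e.g. on solution(1, [-1], [0]): A returns ['b#'], B does not finish within the time limit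
import Mathlib
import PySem

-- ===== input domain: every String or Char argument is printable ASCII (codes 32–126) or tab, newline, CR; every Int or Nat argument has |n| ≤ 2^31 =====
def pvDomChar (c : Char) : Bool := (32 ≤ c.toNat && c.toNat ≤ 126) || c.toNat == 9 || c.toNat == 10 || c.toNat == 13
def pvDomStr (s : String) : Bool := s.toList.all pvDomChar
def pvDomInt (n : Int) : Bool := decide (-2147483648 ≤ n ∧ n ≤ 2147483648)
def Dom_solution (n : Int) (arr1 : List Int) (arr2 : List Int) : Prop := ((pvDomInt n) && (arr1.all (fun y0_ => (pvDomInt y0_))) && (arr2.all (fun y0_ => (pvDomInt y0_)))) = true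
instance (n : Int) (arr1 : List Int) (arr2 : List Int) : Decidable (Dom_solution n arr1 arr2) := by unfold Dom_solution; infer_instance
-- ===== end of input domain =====

-- B builds each row by arithmetic digit extraction (test v & 1, shift, pad, reverse)
-- instead of A's bin()/zfill/replace string pipeline (objective: alternative);
-- equivalence is about return values only (neither mutates).

-- ===== PORT A =====
-- arr1[i] / arr2[i]: Python raises IndexError out of range; Pre_solution excludes that,
-- so the `.getD 0` default is never reached on admitted inputs.
def solution (n : Int) (arr1 : List Int) (arr2 : List Int) : List String :=
  (PySem.List.pyRange 0 n 1).foldl (fun binary_list i =>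
    let binary : Int :=
      PySem.Int.bor ((PySem.List.pyGet? arr1 i).getD 0) ((PySem.List.pyGet? arr2 i).getD 0)
    let binary2 : String := PySem.Str.slice (PySem.Int.pyBin binary) (some 2) none
    let binary2 : String := PySem.Str.zfill binary2 n
    binary_list ++ [PySem.Str.replace (PySem.Str.replace binary2 "1" "#") "0" " "]) []

-- ===== PORT B =====
-- Source B's `while v: chars.append('#' if v & 1 else ' '); v >>= 1`: for v ≥ 0 (all of
-- Pre_solution), v & 1 is v % 2 and v >>= 1 is v / 2, so recursion on v.toNat is exact;
-- Python's loop does not terminate for negative v, which Pre_solution excludes.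
def pyBitsB : Nat → List Char
  | 0 => []
  | (v + 1) => (if (v + 1) % 2 = 1 then '#' else ' ') :: pyBitsB ((v + 1) / 2)
decreasing_by omega

-- `chars += [' '] * (n - len(chars))`: Python's list * k is empty for k ≤ 0, exactly `.toNat`.
def solution_alt (n : Int) (arr1 : List Int) (arr2 : List Int) : List String :=
  (PySem.List.pyRange 0 n 1).foldl (fun rows i =>
    let v : Int :=
      PySem.Int.bor ((PySem.List.pyGet? arr1 i).getD 0) ((PySem.List.pyGet? arr2 i).getD 0)
    let chars : List Char := pyBitsB v.toNat
    let chars : List Char := chars ++ List.replicate (n - (chars.length : Int)).toNat ' '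
    rows ++ [String.ofList chars.reverse]) []

-- ===== PRECONDITION & SPEC =====
-- Pre_ excludes (a) n exceeding a list length, where A raises IndexError (B raises too), and
-- (b) inputs with a negative entry among the first n of arr1/arr2, where A's bin(v)[2:]
-- slicing leaves a stray 'b' in the row (e.g. ['b#']) — an artefact of A's string slicing —
-- and B's digit-extraction loop does not terminate.
def Pre_solution (n : Int) (arr1 : List Int) (arr2 : List Int) : Prop :=
  n ≤ (arr1.length : Int) ∧ n ≤ (arr2.length : Int) ∧
    (∀ x ∈ arr1.take n.toNat, 0 ≤ x) ∧ (∀ x ∈ arr2.take n.toNat, 0 ≤ x)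
instance (n : Int) (arr1 : List Int) (arr2 : List Int) : Decidable (Pre_solution n arr1 arr2) := by unfold Pre_solution; infer_instance
def pvWitness_solution : Int × List Int × List Int := (2, [9, 20], [30, 1])

def Spec_solution (n : Int) (arr1 : List Int) (arr2 : List Int) (out : List String) : Prop :=
  out = solution_alt n arr1 arr2
instance (n : Int) (arr1 : List Int) (arr2 : List Int) (out : List String) : Decidable (Spec_solution n arr1 arr2 out) := by unfold Spec_solution; infer_instance

-- ===== CLAIM (what is proved, stated in full; the proofs are below) =====
def Claim_equal_solution : Prop := ∀ (n : Int) (arr1 : List Int) (arr2 : List Int), Dom_solution n arr1 arr2 → Pre_solution n arr1 arr2 → Spec_solution n arr1 arr2 (solution n arr1 arr2)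

-- ===== LEMMAS AND PROOFS =====

-- digit count of bin(m)[2:] for m ≥ 0 (bit_length, but 1 for m = 0)
def pvDigLen (m : Nat) : Nat := max 1 (PySem.Int.bitLength (m : Int))

-- the canonical '#'/' ' row of width L
def pvCan (m L : Nat) : List Char :=
  (List.range L).reverse.map (fun k => if m.testBit k then '#' else ' ')

theorem pvFoldlAppend {α β : Type} (f : α → β) (l : List α) (acc : List β) :
    l.foldl (fun a i => a ++ [f i]) acc = acc ++ l.map f := by
  induction l generalizing acc with
  | nil => simp
  | cons x xs ih => simp [List.foldl_cons, ih]

theorem pvCan_succ_high (m L : Nat) :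
    pvCan m (L + 1) = (if m.testBit L then '#' else ' ') :: pvCan m L := by
  simp [pvCan, List.range_succ]

theorem pvCan_pad (m L p : Nat) (h : ∀ k, L ≤ k → m.testBit k = false) :
    pvCan m (p + L) = List.replicate p ' ' ++ pvCan m L := by
  induction p with
  | zero => simp
  | succ p ih =>
    have : p + 1 + L = (p + L) + 1 := by omega
    rw [this, pvCan_succ_high, ih, h (p + L) (by omega)]
    simp [List.replicate_succ]

theorem pvBitLen_pos {m : Nat} (h : 0 < m) : 0 < PySem.Int.bitLength (m : Int) := by
  rw [PySem.Int.bitLength_natCast h]; omega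

theorem pvTestBit_ge_bitLen (m k : Nat) (h : PySem.Int.bitLength (m : Int) ≤ k) :
    m.testBit k = false := by
  apply Nat.testBit_lt_two_pow
  calc m = (m : Int).natAbs := by simp
    _ < 2 ^ PySem.Int.bitLength (m : Int) := PySem.Int.lt_two_pow_bitLength _
    _ ≤ 2 ^ k := Nat.pow_le_pow_right (by omega) h

-- B's low-to-high digit list, written by bit positions
theorem pvBitsB_eq (m : Nat) :
    pyBitsB m = (List.range (PySem.Int.bitLength (m : Int))).map
      (fun k => if m.testBit k then '#' else ' ') := by
  induction m using Nat.strong_induction_on with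
  | _ m ih =>
    match m with
    | 0 => simp [pyBitsB]
    | v + 1 =>
      rw [pyBitsB, ih ((v + 1) / 2) (by omega),
        PySem.Int.bitLength_natCast (show 0 < v + 1 by omega),
        List.range_succ_eq_map]
      simp only [List.map_cons, List.map_map]
      congr 1
      · rcases Nat.mod_two_eq_zero_or_one (v + 1) with hp | hp <;>
          simp [Nat.testBit_zero, hp]
      · apply List.map_congr_left
        intro k _
        simp [Function.comp, Nat.testBit_add_one]

-- Nat.toDigits 2 m written by bit positions
theorem pvToDigitsCore_eq (f : Nat) : ∀ (m : Nat) (acc : List Char), m < f →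
    Nat.toDigitsCore 2 f m acc =
      ((List.range (pvDigLen m)).reverse.map (fun k => if m.testBit k then '1' else '0')) ++ acc := by
  induction f with
  | zero => intro m acc h; omega
  | succ f ih =>
    intro m acc h
    rw [Nat.toDigitsCore]
    by_cases h2 : m / 2 = 0
    · have hm : m = 0 ∨ m = 1 := by omega
      have hd0 : pvDigLen 0 = 1 := by decide
      have hd1 : pvDigLen 1 = 1 := by decide
      rcases hm with hm | hm <;> subst hm <;> simp [h2, hd0, hd1, List.range_succ] <;> decide
    · have hm2 : 2 ≤ m := by omega
      rw [if_neg h2, ih (m / 2) _ (by omega)]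
      have hdl : pvDigLen m = pvDigLen (m / 2) + 1 := by
        have h1 := PySem.Int.bitLength_natCast (m := m) (by omega)
        have h2' : 0 < PySem.Int.bitLength ((m / 2 : Nat) : Int) := pvBitLen_pos (by omega)
        unfold pvDigLen
        rw [h1]
        omega
      have hsplit : (List.range (pvDigLen m)).reverse.map
            (fun k => if m.testBit k then '1' else '0')
          = ((List.range (pvDigLen (m / 2))).reverse.map
              (fun k => if (m / 2).testBit k then '1' else '0'))
            ++ [if m.testBit 0 then '1' else '0'] := by
        rw [hdl, List.range_succ_eq_map]
        simp only [List.reverse_cons, List.map_append, List.map_reverse, List.map_map]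
        congr 1
        · congr 1
          apply List.map_congr_left
          intro k _
          simp [Function.comp, Nat.testBit_add_one]
      rw [hsplit, List.append_assoc]
      congr 1
      have : Nat.digitChar (m % 2) = (if m.testBit 0 then '1' else '0') := by
        rcases Nat.mod_two_eq_zero_or_one m with hp | hp <;>
          simp [Nat.testBit_zero, hp] <;> decide
      rw [this]
      rfl

theorem pvToDigits_eq (m : Nat) :
    Nat.toDigits 2 m =
      (List.range (pvDigLen m)).reverse.map (fun k => if m.testBit k then '1' else '0') := by
  have := pvToDigitsCore_eq (m + 1) m [] (by omega)
  simpa [Nat.toDigits] using this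

theorem pvReplaceGo (c d : Char) : ∀ (fuel : Nat) (l acc : List Char), l.length ≤ fuel →
    PySem.Chars.replace.go [c] [d] fuel l acc
      = acc.reverse ++ l.map (fun x => if x = c then d else x) := by
  intro fuel
  induction fuel with
  | zero =>
    intro l acc h
    have : l = [] := by cases l <;> simp_all
    subst this; simp [PySem.Chars.replace.go]
  | succ f ih =>
    intro l acc h
    cases l with
    | nil => simp [PySem.Chars.replace.go]
    | cons x t =>
      rw [PySem.Chars.replace.go]
      by_cases hx : x = c
      · subst hx
        have hp : List.isPrefixOf [x] (x :: t) = true := by simp [List.isPrefixOf]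
        rw [if_pos hp]
        show PySem.Chars.replace.go [x] [d] f t (d :: acc) = _
        rw [ih t _ (by simpa using h)]
        simp
      · have hp : List.isPrefixOf [c] (x :: t) = false := by
          simp [List.isPrefixOf]
          intro hc; exact absurd hc.symm hx
        rw [if_neg (by simp [hp])]
        rw [ih t _ (by simpa using h)]
        simp [hx]

theorem pvReplace_single (cs : List Char) (c d : Char) :
    PySem.Chars.replace cs [c] [d] = cs.map (fun x => if x = c then d else x) := by
  rw [PySem.Chars.replace]
  simp only [List.isEmpty]
  rw [pvReplaceGo c d cs.length cs [] le_rfl]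
  simp

theorem pvZfill_nosign (x : Char) (rest : List Char) (hx1 : x ≠ '+') (hx2 : x ≠ '-') (w : Int) :
    PySem.Chars.zfill (x :: rest) w
      = List.replicate (w.toNat - (x :: rest).length) '0' ++ (x :: rest) := by
  rw [PySem.Chars.zfill]
  by_cases h1 : w ≤ ((x :: rest).length : Int)
  · rw [if_pos h1]
    have h0 : w.toNat - (x :: rest).length = 0 := by omega
    rw [h0]; simp
  · rw [if_neg h1, if_neg (by simp [hx1, hx2])]

-- the central per-row fact: A's string pipeline = B's extracted, padded, reversed digits,
-- for v = ↑m ≥ 0, n ≥ 1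
theorem pvRow (m : Nat) (n : Int) (hn : 1 ≤ n) :
    PySem.Str.replace (PySem.Str.replace (PySem.Str.zfill
        (PySem.Str.slice (PySem.Int.pyBin (m : Int)) (some 2) none) n) "1" "#") "0" " "
      = String.ofList ((pyBitsB m
          ++ List.replicate (n - ((pyBitsB m).length : Int)).toNat ' ').reverse) := by
  have hofList : ∀ (s : String) (l : List Char), s.toList = l → s = String.ofList l := by
    intro s l h; rw [← h, String.ofList_toList]
  apply hofList
  -- A side: toList of the pipeline
  have hslice : (PySem.Str.slice (PySem.Int.pyBin (m : Int)) (some 2) none).toList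
      = Nat.toDigits 2 m := by
    rw [PySem.Str.toList_slice, PySem.Int.toList_pyBin, PySem.Chars.slice_eq_listSlice,
      PySem.List.slice_from _ (by norm_num)]
    rw [PySem.Int.toBinChars0b, if_neg (by omega)]
    simp
  have hL1 : 1 ≤ pvDigLen m := le_max_left _ _
  obtain ⟨L, hLd⟩ : ∃ L, pvDigLen m = L + 1 := ⟨pvDigLen m - 1, by omega⟩
  rw [PySem.Str.toList_replace, PySem.Str.toList_replace, PySem.Str.toList_zfill, hslice,
    pvToDigits_eq, hLd]
  have hcons : (List.range (L + 1)).reverse.map (fun k => if m.testBit k then '1' else '0')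
      = (if m.testBit L then '1' else '0')
        :: (List.range L).reverse.map (fun k => if m.testBit k then '1' else '0') := by
    rw [List.range_succ]; simp
  rw [hcons, pvZfill_nosign _ _ (by split_ifs <;> decide) (by split_ifs <;> decide), ← hcons]
  have hlen : ((List.range (L + 1)).reverse.map
      (fun k => if m.testBit k then '1' else '0')).length = L + 1 := by simp
  rw [hlen]
  rw [show ("1" : String).toList = ['1'] from rfl, show ("#" : String).toList = ['#'] from rfl,
    show ("0" : String).toList = ['0'] from rfl, show (" " : String).toList = [' '] from rfl]
  rw [pvReplace_single, pvReplace_single]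
  rw [List.map_append, List.map_append, List.map_replicate, List.map_replicate]
  rw [show (if ('0' : Char) = '1' then '#' else '0') = '0' from by decide,
    show (if ('0' : Char) = '0' then ' ' else '0') = ' ' from by decide]
  rw [List.map_map, List.map_map]
  have hdig : (((fun x => if x = '0' then ' ' else x) ∘ (fun x => if x = '1' then '#' else x))
        ∘ (fun k => if m.testBit k then '1' else '0'))
      = (fun k => if m.testBit k then '#' else ' ') := by
    funext k
    by_cases hb : m.testBit k <;> simp [Function.comp, hb]
  rw [hdig]
  -- A side is now padding + pvCan m (L+1); collapse the padding
  set L0 : Nat := PySem.Int.bitLength (m : Int) with hL0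
  have hA : List.replicate (n.toNat - (L + 1)) ' '
        ++ (List.range (L + 1)).reverse.map (fun k => if m.testBit k then '#' else ' ')
      = pvCan m (max n.toNat (L + 1)) := by
    rw [show max n.toNat (L + 1) = (n.toNat - (L + 1)) + (L + 1) by omega,
      pvCan_pad m _ _ (fun k hk => pvTestBit_ge_bitLen m k (by unfold pvDigLen at hLd; omega))]
    rfl
  rw [hA]
  -- B side: reverse of digits-then-padding = padding-then-canonical row of width L0
  have hlenB : (pyBitsB m).length = L0 := by rw [pvBitsB_eq, hL0]; simp
  have hrevB : (pyBitsB m).reverse = pvCan m L0 := by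
    rw [pvBitsB_eq, pvCan, List.map_reverse]
  rw [List.reverse_append, List.reverse_replicate, hrevB, hlenB]
  -- widths agree since n ≥ 1 and pvDigLen m = max 1 L0
  have hw : max n.toNat (L + 1) = ((n - (L0 : Int)).toNat) + L0 := by
    have : pvDigLen m = max 1 L0 := rfl
    omega
  rw [hw, pvCan_pad m L0 _ (fun k hk => pvTestBit_ge_bitLen m k (by rw [← hL0]; omega))]

-- ===== VERDICT (by name: the statement is the Claim_ definition above) =====
theorem solution_spec : Claim_equal_solution := by
  intro n arr1 arr2 _hDom hPre
  unfold Spec_solution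
  obtain ⟨hP1, hP2, hA1, hA2⟩ := hPre
  unfold solution solution_alt
  rw [pvFoldlAppend, pvFoldlAppend]
  simp only [List.nil_append]
  apply List.map_congr_left
  intro i hi
  rw [PySem.List.mem_pyRange_one] at hi
  obtain ⟨hi0, hin⟩ := hi
  have h1l : i.toNat < arr1.length := by omega
  have h2l : i.toNat < arr2.length := by omega
  have hg1 : PySem.List.pyGet? arr1 i = some arr1[i.toNat] := by
    rw [PySem.List.pyGet?_of_nonneg _ hi0, List.getElem?_eq_getElem h1l]
  have hg2 : PySem.List.pyGet? arr2 i = some arr2[i.toNat] := by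
    rw [PySem.List.pyGet?_of_nonneg _ hi0, List.getElem?_eq_getElem h2l]
  have ha : 0 ≤ arr1[i.toNat] := by
    apply hA1
    have hlt : i.toNat < (arr1.take n.toNat).length := by simp; omega
    have he : (arr1.take n.toNat)[i.toNat] = arr1[i.toNat] := List.getElem_take
    rw [← he]
    exact List.getElem_mem hlt
  have hb : 0 ≤ arr2[i.toNat] := by
    apply hA2
    have hlt : i.toNat < (arr2.take n.toNat).length := by simp; omega
    have he : (arr2.take n.toNat)[i.toNat] = arr2[i.toNat] := List.getElem_take
    rw [← he]
    exact List.getElem_mem hlt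
  simp only [hg1, hg2, Option.getD_some]
  rw [PySem.Int.bor_of_nonneg ha hb]
  have hv : (PySem.Int.bor arr1[i.toNat] arr2[i.toNat]).toNat
      = (arr1[i.toNat].toNat ||| arr2[i.toNat].toNat) := by
    rw [PySem.Int.bor_of_nonneg ha hb]; omega
  exact pvRow _ n (by omega)
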